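-- pv_equiv track=rewrite | github.com/calico-team/raffle-sp23-public | raffle.py | get_ticket_dist
-- ===== SOURCE A (Python) =====
-- def get_ticket_dist(identifier_to_team, team_to_tickets):
--     d = dict() # identifier -> tickets
--     total = 0
--     for identifier in identifier_to_team:
--         team = identifier_to_team[identifier]
--         if team in team_to_tickets:
--             d[identifier] = team_to_tickets[team]
--             total += d[identifier]
--     return d, total
-- ===== SOURCE B (Python) =====
-- def get_ticket_dist(identifier_to_team, team_to_tickets):
--     d = {i: team_to_tickets[t]
--          for i, t in identifier_to_team.items()
--          if t in team_to_tickets}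
--     counts = {}
--     for t in identifier_to_team.values():
--         counts[t] = counts.get(t, 0) + 1
--     total = sum(tickets * counts.get(team, 0)
--                 for team, tickets in team_to_tickets.items())
--     return d, total
-- ===== Notes on version B (the rewrite author's own statement) =====
-- stated objective: alternative
-- what changed: Builds the identifier->tickets table by a filtering comprehension, and computes the total by a group-by: a team-multiplicity count over identifier_to_team's values followed by a dot product tickets*count iterated over team_to_tickets, instead of A's single loop accumulating per identifier.
import Mathlib
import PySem

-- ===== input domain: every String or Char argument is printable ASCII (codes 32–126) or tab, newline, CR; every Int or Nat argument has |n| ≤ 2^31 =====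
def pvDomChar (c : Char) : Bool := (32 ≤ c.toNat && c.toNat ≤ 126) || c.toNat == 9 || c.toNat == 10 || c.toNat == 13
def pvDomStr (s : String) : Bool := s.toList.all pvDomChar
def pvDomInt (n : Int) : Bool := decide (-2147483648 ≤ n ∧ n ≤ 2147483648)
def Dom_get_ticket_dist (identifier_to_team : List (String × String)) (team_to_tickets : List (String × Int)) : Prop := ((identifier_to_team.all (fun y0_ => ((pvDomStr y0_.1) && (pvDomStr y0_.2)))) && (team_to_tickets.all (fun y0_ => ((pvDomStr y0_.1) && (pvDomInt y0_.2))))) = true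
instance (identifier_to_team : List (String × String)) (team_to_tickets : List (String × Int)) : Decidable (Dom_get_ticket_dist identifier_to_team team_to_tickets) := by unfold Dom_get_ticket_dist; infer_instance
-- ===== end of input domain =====

-- B builds the table by a filtering comprehension and computes the total by a group-by:
-- team multiplicities counted over identifier_to_team's values, then a dot product
-- tickets * count taken over team_to_tickets (objective: alternative algorithm, same cost).

-- ===== PORT A =====
-- A: one loop over the keys of identifier_to_team, accumulating both the dict and the total.
-- 'for identifier in d' with 'team = d[identifier]' walks the dict's (key, value) items in
-- insertion order — ported as a fold over (Dict.ofList identifier_to_team).items.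
def get_ticket_dist (identifier_to_team : List (String × String)) (team_to_tickets : List (String × Int)) : (List (String × Int)) × Int :=
  let itd : PySem.Dict String String := PySem.Dict.ofList identifier_to_team
  let ttd : PySem.Dict String Int := PySem.Dict.ofList team_to_tickets
  let st := itd.items.foldl
    (fun (st : PySem.Dict String Int × Int) p =>
      if ttd.contains p.2 then (st.1.insert p.1 (ttd.getD p.2 0), st.2 + ttd.getD p.2 0)
      else st)
    (PySem.Dict.empty, 0)
  (st.1.items, st.2)

-- ===== PORT B =====
-- B: (1) dict comprehension (filterMap over items, then dict() of the pairs);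
--    (2) counts[t] = counts.get(t, 0) + 1 over identifier_to_team.values();
--    (3) total = sum(tickets * counts.get(team, 0) over team_to_tickets.items()).
def get_ticket_dist_alt (identifier_to_team : List (String × String)) (team_to_tickets : List (String × Int)) : (List (String × Int)) × Int :=
  let itd : PySem.Dict String String := PySem.Dict.ofList identifier_to_team
  let ttd : PySem.Dict String Int := PySem.Dict.ofList team_to_tickets
  let d : PySem.Dict String Int := PySem.Dict.ofList
    (itd.items.filterMap (fun p => (ttd.get? p.2).map (fun v => (p.1, v))))
  let counts : PySem.Dict String Int := itd.values.foldl
    (fun (c : PySem.Dict String Int) t => c.insert t (c.getD t 0 + 1)) PySem.Dict.empty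
  let total : Int := ttd.items.foldl (fun s q => s + q.2 * counts.getD q.1 0) 0
  (d.items, total)

-- ===== PRECONDITION & SPEC =====
def Spec_get_ticket_dist (identifier_to_team : List (String × String)) (team_to_tickets : List (String × Int)) (out : (List (String × Int)) × Int) : Prop := out = get_ticket_dist_alt identifier_to_team team_to_tickets
instance (identifier_to_team : List (String × String)) (team_to_tickets : List (String × Int)) (out : (List (String × Int)) × Int) : Decidable (Spec_get_ticket_dist identifier_to_team team_to_tickets out) := by unfold Spec_get_ticket_dist; infer_instance

-- ===== CLAIM (what is proved, stated in full; the proofs are below) =====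
def Claim_equal_get_ticket_dist : Prop := ∀ (identifier_to_team : List (String × String)) (team_to_tickets : List (String × Int)), Dom_get_ticket_dist identifier_to_team team_to_tickets → Spec_get_ticket_dist identifier_to_team team_to_tickets (get_ticket_dist identifier_to_team team_to_tickets)

-- ===== LEMMAS AND PROOFS =====

-- keys of the comprehension's pair list form a sublist of the origin's keys
theorem pv_fst_filterMap_sublist (ttd : PySem.Dict String Int) (l : List (String × String)) :
    ((l.filterMap (fun p => (ttd.get? p.2).map (fun v => (p.1, v)))).map (·.1)).Sublist
      (l.map (·.1)) := by
  induction l with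
  | nil => simp
  | cons a l ih =>
    cases h : ttd.get? a.2 with
    | none =>
      simp only [List.filterMap_cons, h, Option.map_none, List.map_cons]
      exact ih.cons _
    | some v =>
      simp only [List.filterMap_cons, h, Option.map_some, List.map_cons]
      exact ih.cons₂ _

-- A's accumulating loop, split into the dict-building fold and the value sum
theorem pv_fold_split (ttd : PySem.Dict String Int) (l : List (String × String))
    (d0 : PySem.Dict String Int) (t0 : Int) :
    l.foldl
      (fun (st : PySem.Dict String Int × Int) p =>
        if ttd.contains p.2 then (st.1.insert p.1 (ttd.getD p.2 0), st.2 + ttd.getD p.2 0)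
        else st) (d0, t0)
    = ((l.filterMap (fun p => (ttd.get? p.2).map (fun v => (p.1, v)))).foldl
          (fun d p => d.insert p.1 p.2) d0,
       t0 + ((l.filterMap (fun p => (ttd.get? p.2).map (fun v => (p.1, v)))).map (·.2)).sum) := by
  induction l generalizing d0 t0 with
  | nil => simp
  | cons a l ih =>
    cases h : ttd.get? a.2 with
    | none =>
      have hc : ttd.contains a.2 = false := by
        rw [PySem.Dict.contains_eq_isSome_get?, h]; rfl
      simp [h, hc, ih]
    | some v =>
      have hc : ttd.contains a.2 = true := by
        rw [PySem.Dict.contains_eq_isSome_get?, h]; rfl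
      have hg : ttd.getD a.2 0 = v := by rw [PySem.Dict.getD_eq_get?_getD, h]; rfl
      rw [List.foldl_cons, List.filterMap_cons, h]
      simp only [hc, if_pos, hg, ih, Option.map_some, List.foldl_cons, List.map_cons, List.sum_cons]
      ring_nf

-- the per-identifier value sum, written as a sum over the teams column
theorem pv_sum_filterMap (ttd : PySem.Dict String Int) (l : List (String × String)) :
    ((l.filterMap (fun p => (ttd.get? p.2).map (fun v => (p.1, v)))).map (·.2)).sum
      = ((l.map (·.2)).map (fun t => (ttd.get? t).getD 0)).sum := by
  induction l with
  | nil => simp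
  | cons a l ih =>
    cases h : ttd.get? a.2 with
    | none => simp [h, ih]
    | some v => simp [h, ih]

-- with distinct keys, summing q.2 over the entries whose key is t is the lookup of t
theorem pv_sum_key_hits (dl : List (String × Int)) (hnd : (dl.map (·.1)).Nodup) (t : String) :
    (dl.map (fun q => q.2 * (if q.1 = t then (1 : Int) else 0))).sum
      = ((PySem.Dict.mk dl).get? t).getD 0 := by
  induction dl with
  | nil => simp [PySem.Dict.get?]
  | cons a dl ih =>
    simp only [List.map_cons, List.nodup_cons] at hnd
    rw [List.map_cons, List.sum_cons, PySem.Dict.get?_mk_cons]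
    by_cases he : a.1 = t
    · have hbe : (a.1 == t) = true := beq_iff_eq.mpr he
      have hz : (dl.map (fun q => q.2 * (if q.1 = t then (1 : Int) else 0))).sum = 0 := by
        apply List.sum_eq_zero
        intro x hx
        rcases List.mem_map.mp hx with ⟨q, hq, rfl⟩
        have hne : q.1 ≠ t := by
          intro hqt
          have hmem : t ∈ dl.map (·.1) := hqt ▸ List.mem_map.mpr ⟨q, hq, rfl⟩
          exact hnd.1 (he.symm ▸ hmem)
        rw [if_neg hne, mul_zero]
      rw [hbe, if_pos rfl, if_pos he, hz, mul_one, add_zero, Option.getD_some]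
    · have hbe : (a.1 == t) = false := beq_eq_false_iff_ne.mpr he
      rw [hbe, if_neg he, mul_zero, zero_add, ih hnd.2, if_neg Bool.false_ne_true]

-- pointwise sum splitting over a mapped list
theorem pv_sum_map_add (dl : List (String × Int)) (f g : (String × Int) → Int) :
    (dl.map (fun q => f q + g q)).sum = (dl.map f).sum + (dl.map g).sum := by
  induction dl with
  | nil => simp
  | cons a dl ih => simp [ih]; ring

-- one more team occurrence adds exactly that team's lookup to the dot product
theorem pv_dot_cons (dl : List (String × Int)) (hnd : (dl.map (·.1)).Nodup)
    (t : String) (vs : List String) :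
    (dl.map (fun q => q.2 * (((t :: vs).count q.1 : Int)))).sum
      = (dl.map (fun q => q.2 * ((vs.count q.1 : Int)))).sum
        + ((PySem.Dict.mk dl).get? t).getD 0 := by
  rw [← pv_sum_key_hits dl hnd t, ← pv_sum_map_add]
  apply congrArg
  apply List.map_congr_left
  intro q _
  have : ((t :: vs).count q.1 : Int) = (vs.count q.1 : Int) + (if q.1 = t then 1 else 0) := by
    by_cases h : q.1 = t
    · simp [h]
    · simp [h, Ne.symm h]
  rw [this]; ring

-- the dot product over team_to_tickets equals the per-occurrence lookup sum
theorem pv_dot_eq_lookup_sum (dl : List (String × Int)) (hnd : (dl.map (·.1)).Nodup)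
    (vs : List String) :
    (dl.map (fun q => q.2 * ((vs.count q.1 : Int)))).sum
      = (vs.map (fun t => ((PySem.Dict.mk dl).get? t).getD 0)).sum := by
  induction vs with
  | nil => simp
  | cons t vs ih => rw [pv_dot_cons dl hnd t vs, ih, List.map_cons, List.sum_cons]; ring

-- ===== VERDICT (by name: the statement is the Claim_ definition above) =====
theorem get_ticket_dist_spec : Claim_equal_get_ticket_dist := by
  intro it tt _
  show get_ticket_dist it tt = get_ticket_dist_alt it tt
  unfold get_ticket_dist get_ticket_dist_alt
  dsimp only
  set itd : PySem.Dict String String := PySem.Dict.ofList it with hitd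
  set ttd : PySem.Dict String Int := PySem.Dict.ofList tt with httd
  set fm := itd.items.filterMap (fun p => (ttd.get? p.2).map (fun v => (p.1, v))) with hfm
  -- dict part
  have hnd : (fm.map (·.1)).Nodup :=
    (pv_fst_filterMap_sublist ttd itd.items).nodup (PySem.Dict.nodup_keys_ofList it)
  have hfresh : fm.foldl (fun d p => d.insert p.1 p.2) (PySem.Dict.empty : PySem.Dict String Int)
      = PySem.Dict.ofList fm := rfl
  have hitems : (PySem.Dict.ofList fm : PySem.Dict String Int).items = fm := by
    rw [← hfresh]
    simpa using PySem.Dict.items_foldl_insert_fresh fm (·.1) (·.2) PySem.Dict.empty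
      (by intro a _; exact PySem.Dict.contains_empty _) hnd
  -- total part
  have hcounter : itd.values.foldl
      (fun (c : PySem.Dict String Int) t => c.insert t (c.getD t 0 + 1)) PySem.Dict.empty
      = PySem.Dict.counter itd.values :=
    PySem.Dict.foldl_insert_getD_add_one_eq_counter itd.values
  have hmk : PySem.Dict.mk ttd.items = ttd := by
    apply PySem.Dict.ext; rfl
  have hndtt : (ttd.items.map (·.1)).Nodup := PySem.Dict.nodup_keys_ofList tt
  have htot : ttd.items.foldl
      (fun s q => s + q.2 * (PySem.Dict.counter itd.values).getD q.1 0) 0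
      = (fm.map (·.2)).sum := by
    rw [PySem.List.foldl_add]
    have hmap : ttd.items.map (fun q => q.2 * (PySem.Dict.counter itd.values).getD q.1 0)
        = ttd.items.map (fun q => q.2 * ((itd.values.count q.1 : Int))) := by
      apply List.map_congr_left; intro q _
      rw [PySem.Dict.getD_counter]
    rw [hmap, pv_dot_eq_lookup_sum ttd.items hndtt itd.values, hmk,
      pv_sum_filterMap ttd itd.items]
    simp [PySem.Dict.values]
  rw [pv_fold_split, hcounter]
  rw [Prod.mk.injEq]
  constructor
  · rw [hfresh, hitems]
  · rw [htot]; ring
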